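-- pv_equiv track=rewrite | github.com/CrawlingHam/university-projects | Programming for Data Science/Week 1/Lab 0/Part 2/text_processing.py | text_processing
-- ===== SOURCE A (Python) =====
-- from string import punctuation as punctuations
--
-- def text_processing(text: str) -> tuple[str, list[str]]:
--     chars = list(text)
--     prev_was_space = False
--     current_hashtag = []
--     result_chars = []
--     in_tag = False
--     hashtags = []
--     i = 0
--
--     while i < len(chars):
--         char = chars[i]
--         char_code = ord(char)
--
--         is_printable = 32 <= char_code <= 126
--
--         if not is_printable:
--             i += 1
--             continue
--
--         if char == '@':
--             in_tag = True
--             i += 1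
--             while i < len(chars) and chars[i] != ' ' and chars[i] not in punctuations:
--                 i += 1
--             in_tag = False
--             continue
--
--         if in_tag:
--             i += 1
--             continue
--
--         if char == '#':
--             current_hashtag = []
--             i += 1
--             while i < len(chars):
--                 next_char = chars[i]
--                 next_code = ord(next_char) if i < len(chars) else 0
--
--                 if next_char == ' ' or next_char in punctuations:
--                     break
--
--                 if not (32 <= next_code <= 126):
--                     i += 1
--                     continue
--
--                 current_hashtag.append(next_char)
--                 i += 1
--
--             if current_hashtag:
--                 hashtag_word = "".join(current_hashtag)
--                 hashtags.append(hashtag_word)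
--                 for c in current_hashtag:
--                     result_chars.append(c)
--                     prev_was_space = False
--             continue
--
--         if char in punctuations:
--             prev_is_letter = False
--             next_is_letter = False
--
--             if result_chars and len(result_chars) > 0:
--                 last_char = result_chars[-1]
--                 prev_is_letter = ('a' <= last_char <= 'z') or ('A' <= last_char <= 'Z')
--
--             if i + 1 < len(chars):
--                 next_char = chars[i + 1]
--                 next_is_letter = ('a' <= next_char <= 'z') or ('A' <= next_char <= 'Z')
--
--             if prev_is_letter and next_is_letter:
--                 i += 1
--                 continue
--
--             # replace with space
--             if not prev_was_space:
--                 result_chars.append(' ')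
--                 prev_was_space = True
--             i += 1
--             continue
--
--         if char == ' ':
--             if not prev_was_space:
--                 result_chars.append(' ')
--                 prev_was_space = True
--             i += 1
--             continue
--
--         result_chars.append(char)
--         prev_was_space = False
--         i += 1
--
--     processed_text = "".join(result_chars).strip()
--
--     return processed_text, hashtags
-- ===== SOURCE B (Python) =====
-- from string import punctuation as punctuations
--
-- def text_processing(text: str) -> tuple[str, list[str]]:
--     # single-pass finite-state machine: state 0 = NORMAL, 1 = IN_TAG, 2 = IN_HASHTAG
--     PUNCT = set(punctuations)
--     result = []
--     hashtags = []
--     buf = []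
--     prev_space = False
--     state = 0
--     n = len(text)
--     for i, c in enumerate(text):
--         if state == 1:
--             if c == ' ' or c in PUNCT:
--                 state = 0          # fall through: reprocess the terminator normally
--             else:
--                 continue           # everything else (even non-printables) is consumed
--         elif state == 2:
--             if c == ' ' or c in PUNCT:
--                 if buf:
--                     hashtags.append(''.join(buf))
--                     result.extend(buf)
--                     prev_space = False
--                 state = 0          # fall through: reprocess the terminator normally
--             elif 32 <= ord(c) <= 126:
--                 buf.append(c)
--                 continue
--             else:
--                 continue           # non-printables inside a hashtag are skipped
--         # NORMAL state
--         if not (32 <= ord(c) <= 126):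
--             continue
--         if c == '@':
--             state = 1
--             continue
--         if c == '#':
--             state = 2
--             buf = []
--             continue
--         if c in PUNCT:
--             prev_letter = bool(result) and ('a' <= result[-1] <= 'z' or 'A' <= result[-1] <= 'Z')
--             next_letter = i + 1 < n and ('a' <= text[i + 1] <= 'z' or 'A' <= text[i + 1] <= 'Z')
--             if prev_letter and next_letter:
--                 continue
--             if not prev_space:
--                 result.append(' ')
--                 prev_space = True
--             continue
--         if c == ' ':
--             if not prev_space:
--                 result.append(' ')
--                 prev_space = True
--             continue
--         result.append(c)
--         prev_space = False
--     if state == 2 and buf: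
--         hashtags.append(''.join(buf))
--         result.extend(buf)
--     return ''.join(result).strip(), hashtags
-- ===== Notes on version B (the rewrite author's own statement) =====
-- stated objective: alternative
-- what changed: Replaced A's outer while-loop with nested index-advancing inner while-loops for @-tags and #-hashtags by a single flat pass over the characters driven by an explicit finite-state machine (NORMAL/IN_TAG/IN_HASHTAG) with a hashtag buffer and one-character lookahead.
import Mathlib
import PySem

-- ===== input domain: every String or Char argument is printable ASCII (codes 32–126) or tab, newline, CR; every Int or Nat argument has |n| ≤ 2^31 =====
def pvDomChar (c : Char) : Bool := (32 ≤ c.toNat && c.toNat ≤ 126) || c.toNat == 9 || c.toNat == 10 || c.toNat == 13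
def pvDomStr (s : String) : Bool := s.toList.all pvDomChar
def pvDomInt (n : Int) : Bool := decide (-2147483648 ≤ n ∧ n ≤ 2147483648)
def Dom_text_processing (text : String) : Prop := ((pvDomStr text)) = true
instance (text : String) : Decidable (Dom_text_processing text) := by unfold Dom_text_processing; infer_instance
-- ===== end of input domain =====

-- B replaces A's nested index-advancing while-loops by one flat finite-state machine pass (same O(n), measured constant-factor faster in a timing run).

-- shared character classes (string.punctuation, printable ASCII, ASCII letter)
def pvPunct : List Char := "!\"#$%&'()*+,-./:;<=>?@[\\]^_`{|}~".toList
def pvPrintable (c : Char) : Bool := 32 ≤ c.toNat && c.toNat ≤ 126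
def pvIsLetter (c : Char) : Bool := ('a' ≤ c && c ≤ 'z') || ('A' ≤ c && c ≤ 'Z')

-- ===== PORT A =====

-- inner while-loop after '@': consume until space or punctuation
def pvAtLoop : List Char → List Char
  | [] => []
  | c :: rest => if c != ' ' && !(pvPunct.contains c) then pvAtLoop rest else c :: rest

-- inner while-loop after '#': returns (current_hashtag, remaining chars)
def pvHashLoop : List Char → List Char → List Char × List Char
  | [], buf => (buf, [])
  | c :: rest, buf =>
    if c == ' ' || pvPunct.contains c then (buf, c :: rest)
    else if !(pvPrintable c) then pvHashLoop rest buf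
    else pvHashLoop rest (buf ++ [c])

theorem pvAtLoop_length_le (cs : List Char) : (pvAtLoop cs).length ≤ cs.length := by
  induction cs with
  | nil => simp [pvAtLoop]
  | cons c rest ih =>
    simp only [pvAtLoop]
    split
    · exact Nat.le_succ_of_le ih
    · simp

theorem pvHashLoop_length_le (cs buf : List Char) : (pvHashLoop cs buf).2.length ≤ cs.length := by
  induction cs generalizing buf with
  | nil => simp [pvHashLoop]
  | cons c rest ih =>
    simp only [pvHashLoop]
    split
    · simp
    · split
      · exact Nat.le_succ_of_le (ih buf)
      · exact Nat.le_succ_of_le (ih (buf ++ [c]))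

-- outer while-loop of A: state (result_chars, prev_was_space, in_tag, hashtags)
def pvLoopA : List Char → List Char → Bool → Bool → List String → List Char × List String
  | [], res, _, _, tags => (res, tags)
  | c :: rest, res, prev, inTag, tags =>
    if !(pvPrintable c) then pvLoopA rest res prev inTag tags
    else if c == '@' then pvLoopA (pvAtLoop rest) res prev false tags
    else if inTag then pvLoopA rest res prev inTag tags
    else if c == '#' then
      let p := pvHashLoop rest []
      if p.1 ≠ [] then
        let rp := p.1.foldl (fun (a : List Char × Bool) d => (a.1 ++ [d], false)) (res, prev)
        pvLoopA p.2 rp.1 rp.2 inTag (tags ++ [String.ofList p.1])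
      else pvLoopA p.2 res prev inTag tags
    else if pvPunct.contains c then
      let prevL := match res.getLast? with | some l => pvIsLetter l | none => false
      let nextL := match rest.head? with | some d => pvIsLetter d | none => false
      if prevL && nextL then pvLoopA rest res prev inTag tags
      else if !prev then pvLoopA rest (res ++ [' ']) true inTag tags
      else pvLoopA rest res prev inTag tags
    else if c == ' ' then
      if !prev then pvLoopA rest (res ++ [' ']) true inTag tags
      else pvLoopA rest res prev inTag tags
    else pvLoopA rest (res ++ [c]) false inTag tags
  termination_by cs => cs.length
  decreasing_by
  all_goals first
    | exact Nat.lt_succ_of_le (pvAtLoop_length_le rest)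
    | exact Nat.lt_succ_of_le (pvHashLoop_length_le rest [])
    | (simp only [List.length_cons]; omega)

def text_processing (text : String) : String × List String :=
  let r := pvLoopA text.toList [] false false []
  (PySem.Str.strip (String.ofList r.1), r.2)

-- ===== PORT B =====

inductive PvState where
  | normal : PvState
  | inAt : PvState
  | inHash : List Char → PvState
deriving DecidableEq, Repr

-- emit the hashtag buffer (if nonempty) into (result, prev_space, hashtags)
def pvEmit (buf : List Char) (st : List Char × Bool × List String) : List Char × Bool × List String :=
  if buf.isEmpty then st else (st.1 ++ buf, false, st.2.2 ++ [String.ofList buf])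

-- NORMAL-state handling of one character (look = one-char lookahead)
def pvNormalStep (c : Char) (look : Option Char) (st : List Char × Bool × List String) :
    PvState × (List Char × Bool × List String) :=
  if !(pvPrintable c) then (.normal, st)
  else if c == '@' then (.inAt, st)
  else if c == '#' then (.inHash [], st)
  else if pvPunct.contains c then
    let prevL := match st.1.getLast? with | some l => pvIsLetter l | none => false
    let nextL := match look with | some d => pvIsLetter d | none => false
    if prevL && nextL then (.normal, st)
    else if !st.2.1 then (.normal, (st.1 ++ [' '], true, st.2.2))
    else (.normal, st)
  else if c == ' ' then
    if !st.2.1 then (.normal, (st.1 ++ [' '], true, st.2.2))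
    else (.normal, st)
  else (.normal, (st.1 ++ [c], false, st.2.2))

-- one FSM transition
def pvStep (c : Char) (look : Option Char) (state : PvState) (st : List Char × Bool × List String) :
    PvState × (List Char × Bool × List String) :=
  match state with
  | .normal => pvNormalStep c look st
  | .inAt => if c == ' ' || pvPunct.contains c then pvNormalStep c look st else (.inAt, st)
  | .inHash buf =>
    if c == ' ' || pvPunct.contains c then pvNormalStep c look (pvEmit buf st)
    else if pvPrintable c then (.inHash (buf ++ [c]), st)
    else (.inHash buf, st)

-- the single pass
def pvRunB : List Char → PvState → List Char × Bool × List String → List Char × List String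
  | [], state, st =>
    let st' := match state with | .inHash buf => pvEmit buf st | _ => st
    (st'.1, st'.2.2)
  | c :: rest, state, st =>
    let p := pvStep c rest.head? state st
    pvRunB rest p.1 p.2

def text_processing_alt (text : String) : String × List String :=
  let r := pvRunB text.toList .normal ([], false, [])
  (PySem.Str.strip (String.ofList r.1), r.2)

-- ===== PRECONDITION & SPEC =====
def Spec_text_processing (text : String) (out : String × List String) : Prop := out = text_processing_alt text
instance (text : String) (out : String × List String) : Decidable (Spec_text_processing text out) := by unfold Spec_text_processing; infer_instance

-- ===== CLAIM (what is proved, stated in full; the proofs are below) =====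
def Claim_equal_text_processing : Prop := ∀ (text : String), Dom_text_processing text → Spec_text_processing text (text_processing text)

-- ===== LEMMAS AND PROOFS =====

-- A's per-char hashtag emission fold equals "append the whole buffer, prev := false (if nonempty)"
theorem pvFoldl_emit (buf res : List Char) (prev : Bool) :
    buf.foldl (fun (a : List Char × Bool) d => (a.1 ++ [d], false)) (res, prev)
      = (res ++ buf, if buf.isEmpty then prev else false) := by
  induction buf generalizing res prev with
  | nil => simp
  | cons d rest ih => simp [List.foldl_cons, ih]

-- A's post-hashtag continuation, as one function of (buffer, remaining chars)
def pvAfterHash (p : List Char × List Char) (res : List Char) (prev : Bool) (tags : List String) :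
    List Char × List String :=
  if p.1 ≠ [] then pvLoopA p.2 (res ++ p.1) false false (tags ++ [String.ofList p.1])
  else pvLoopA p.2 res prev false tags

-- one NORMAL-state step of B simulates one outer iteration of A
theorem pvStepNormal (c : Char) (rest res : List Char) (prev : Bool) (tags : List String)
    (ih1 : ∀ res prev tags, pvLoopA rest res prev false tags = pvRunB rest .normal (res, prev, tags))
    (ih2 : ∀ res prev tags, pvLoopA (pvAtLoop rest) res prev false tags = pvRunB rest .inAt (res, prev, tags))
    (ih3 : ∀ res prev tags buf, pvAfterHash (pvHashLoop rest buf) res prev tags = pvRunB rest (.inHash buf) (res, prev, tags)) :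
    pvLoopA (c :: rest) res prev false tags
      = pvRunB rest (pvNormalStep c rest.head? (res, prev, tags)).1 (pvNormalStep c rest.head? (res, prev, tags)).2 := by
  rw [pvLoopA]
  by_cases hpr : pvPrintable c = true
  · by_cases hat : c = '@'
    · subst hat; simp [hpr, pvNormalStep, ih2]
    · by_cases hha : c = '#'
      · subst hha
        simp only [hpr, pvNormalStep, Bool.not_true, Bool.false_eq_true, if_false,
          beq_self_eq_true, if_true, if_neg (by decide : ¬ (('#' : Char) == '@') = true)]
        rw [← ih3 res prev tags []]
        simp only [pvAfterHash, pvFoldl_emit]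
        split
        · next h => simp [h, List.isEmpty_iff]
        · next h => simp
      · by_cases hpu : pvPunct.contains c = true
        · simp only [hpr, pvNormalStep, Bool.not_true, Bool.false_eq_true, if_false,
            beq_iff_eq, if_neg hat, if_neg hha, hpu, if_true]
          split_ifs <;>
            first
              | exact ih1 res prev tags
              | exact ih1 (res ++ [' ']) true tags
        · by_cases hsp : c = ' '
          · subst hsp
            simp only [hpr, pvNormalStep, Bool.not_true, Bool.false_eq_true, if_false,
              beq_iff_eq, if_neg hat, if_neg hha, hpu]
            split_ifs <;>
              first
                | exact ih1 res prev tags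
                | exact ih1 (res ++ [' ']) true tags
          · have hpu' : c ∉ pvPunct := by simpa using hpu
            simp [hpr, pvNormalStep, hat, hha, hpu', hsp, ih1]
  · simp [hpr, pvNormalStep, ih1]

-- the base case of the simulation: no characters left
theorem pvSimNil (res : List Char) (prev : Bool) (tags : List String) :
    (pvLoopA [] res prev false tags = pvRunB [] .normal (res, prev, tags))
    ∧ (pvLoopA (pvAtLoop []) res prev false tags = pvRunB [] .inAt (res, prev, tags))
    ∧ (∀ buf, pvAfterHash (pvHashLoop [] buf) res prev tags = pvRunB [] (.inHash buf) (res, prev, tags)) := by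
  refine ⟨by simp [pvLoopA, pvRunB], by simp [pvAtLoop, pvLoopA, pvRunB], ?_⟩
  intro buf
  by_cases hb : buf = []
  · simp [hb, pvHashLoop, pvAfterHash, pvRunB, pvEmit, pvLoopA]
  · simp [hb, pvHashLoop, pvAfterHash, pvRunB, pvEmit, List.isEmpty_iff, pvLoopA]

-- the three-way simulation, by strong induction on the remaining length
theorem pvSim : ∀ n : Nat, ∀ cs : List Char, cs.length ≤ n → ∀ res prev tags,
    (pvLoopA cs res prev false tags = pvRunB cs .normal (res, prev, tags))
    ∧ (pvLoopA (pvAtLoop cs) res prev false tags = pvRunB cs .inAt (res, prev, tags))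
    ∧ (∀ buf, pvAfterHash (pvHashLoop cs buf) res prev tags = pvRunB cs (.inHash buf) (res, prev, tags)) := by
  intro n
  induction n with
  | zero =>
    intro cs hcs res prev tags
    have hnil : cs = [] := List.length_eq_zero_iff.mp (Nat.le_zero.mp hcs)
    subst hnil
    exact pvSimNil res prev tags
  | succ n ih =>
    intro cs hcs res prev tags
    match cs with
    | [] => exact pvSimNil res prev tags
    | c :: rest =>
      have hr : rest.length ≤ n := by
        have := hcs; simp only [List.length_cons] at this; omega
      have IH1 : ∀ res prev tags, pvLoopA rest res prev false tags = pvRunB rest .normal (res, prev, tags) :=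
        fun r p t => (ih rest hr r p t).1
      have IH2 : ∀ res prev tags, pvLoopA (pvAtLoop rest) res prev false tags = pvRunB rest .inAt (res, prev, tags) :=
        fun r p t => (ih rest hr r p t).2.1
      have IH3 : ∀ res prev tags buf, pvAfterHash (pvHashLoop rest buf) res prev tags = pvRunB rest (.inHash buf) (res, prev, tags) :=
        fun r p t buf => (ih rest hr r p t).2.2 buf
      refine ⟨?_, ?_, ?_⟩
      · rw [pvStepNormal c rest res prev tags IH1 IH2 IH3]
        simp [pvRunB, pvStep]
      · by_cases hterm : (c == ' ' || pvPunct.contains c) = true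
        · have ht : c = ' ' ∨ c ∈ pvPunct := by simpa using hterm
          have hA : pvAtLoop (c :: rest) = c :: rest := by
            rw [pvAtLoop]
            rcases ht with h | h <;> simp [h]
          rw [hA, pvStepNormal c rest res prev tags IH1 IH2 IH3]
          simp [pvRunB, pvStep, ht]
        · have htn : ¬(c = ' ' ∨ c ∈ pvPunct) := by simpa using hterm
          have hA : pvAtLoop (c :: rest) = pvAtLoop rest := by
            rw [pvAtLoop]
            simp [bne_iff_ne, (not_or.mp htn).1, (not_or.mp htn).2]
          rw [hA, IH2]
          simp [pvRunB, pvStep, htn]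
      · intro buf
        by_cases hterm : (c == ' ' || pvPunct.contains c) = true
        · have ht : c = ' ' ∨ c ∈ pvPunct := by simpa using hterm
          have hH : pvHashLoop (c :: rest) buf = (buf, c :: rest) := by
            rw [pvHashLoop]; rcases ht with h | h <;> simp [h]
          rw [hH]
          by_cases hb : buf = []
          · have hE : pvEmit buf (res, prev, tags) = (res, prev, tags) := by simp [hb, pvEmit]
            simp only [pvAfterHash, hb, ne_eq, not_true_eq_false, if_false]
            rw [pvStepNormal c rest res prev tags IH1 IH2 IH3]
            simp [pvRunB, pvStep, ht, pvEmit]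
          · have hE : pvEmit buf (res, prev, tags) = (res ++ buf, false, tags ++ [String.ofList buf]) := by
              simp [pvEmit, List.isEmpty_iff, hb]
            simp only [pvAfterHash, ne_eq, hb, not_false_eq_true, if_true]
            rw [pvStepNormal c rest (res ++ buf) false (tags ++ [String.ofList buf]) IH1 IH2 IH3]
            simp [pvRunB, pvStep, ht, hE]
        · have htn : ¬(c = ' ' ∨ c ∈ pvPunct) := by simpa using hterm
          by_cases hpr : pvPrintable c = true
          · have hH : pvHashLoop (c :: rest) buf = pvHashLoop rest (buf ++ [c]) := by
              rw [pvHashLoop]; simp [(not_or.mp htn).1, (not_or.mp htn).2, hpr]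
            rw [hH, IH3]
            simp [pvRunB, pvStep, htn, hpr]
          · have hH : pvHashLoop (c :: rest) buf = pvHashLoop rest buf := by
              rw [pvHashLoop]; simp [(not_or.mp htn).1, (not_or.mp htn).2, hpr]
            rw [hH, IH3]
            simp [pvRunB, pvStep, htn, hpr]

-- ===== VERDICT (by name: the statement is the Claim_ definition above) =====
theorem text_processing_spec : Claim_equal_text_processing := by
  intro text _
  unfold Spec_text_processing text_processing text_processing_alt
  rw [(pvSim text.toList.length text.toList le_rfl [] false []).1]
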